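-- pv_equiv track=rewrite | github.com/marc-dietrich/tensorflow_model_inference | main.py | get_active_core_range
-- ===== SOURCE A (Python) =====
-- def get_active_core_range(ind, core_id, num_stages):
--     starting = -1
--     ending = -1
--     for stage_idx, core_idx in enumerate(ind):
--         if core_idx == core_id and starting < 0:
--             starting = stage_idx
--         if core_idx != core_id and starting >= 0 and ending < 0:
--             ending = stage_idx - 1
--     if starting == -1:
--         starting = num_stages - 1
--     if ending == -1:
--         ending = num_stages - 1
--     return starting, ending
-- ===== SOURCE B (Python) =====
-- def get_active_core_range(ind, core_id, num_stages):
--     if core_id not in ind: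
--         return num_stages - 1, num_stages - 1
--     starting = ind.index(core_id)
--     ending = num_stages - 1
--     for i, x in enumerate(ind[starting:], start=starting):
--         if x != core_id:
--             ending = i - 1
--             break
--     return starting, ending
-- ===== Notes on version B (the rewrite author's own statement) =====
-- stated objective: simpler
-- what changed: Replaces the single interleaved stateful pass with two sequential phases: list.index finds the start (early exit if absent), then only the suffix is scanned for the first element breaking the run, with the num_stages-1 default built in.
import Mathlib
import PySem

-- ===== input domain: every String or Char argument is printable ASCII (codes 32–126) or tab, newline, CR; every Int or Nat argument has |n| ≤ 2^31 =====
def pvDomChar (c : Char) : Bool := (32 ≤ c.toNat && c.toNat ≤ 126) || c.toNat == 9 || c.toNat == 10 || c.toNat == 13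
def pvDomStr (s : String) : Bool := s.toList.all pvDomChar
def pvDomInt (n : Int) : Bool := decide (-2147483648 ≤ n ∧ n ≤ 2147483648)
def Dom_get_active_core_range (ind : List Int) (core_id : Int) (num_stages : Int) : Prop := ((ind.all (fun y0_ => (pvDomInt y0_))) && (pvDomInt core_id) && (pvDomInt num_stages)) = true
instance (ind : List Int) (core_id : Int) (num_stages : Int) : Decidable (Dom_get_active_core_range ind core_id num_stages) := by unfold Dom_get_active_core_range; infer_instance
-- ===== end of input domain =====

-- B replaces A's single interleaved stateful pass by two sequential phases (find the
-- start with index-of, then scan the suffix for the end of the run) — objective: simpler.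

-- ===== PORT A =====
-- A's enumerate loop over ind with state (starting, ending); stage_idx is the counter.
def pvALoop (core_id : Int) : List Int → Int → Int × Int → Int × Int
  | [], _, st => st
  | core_idx :: rest, stage_idx, (starting, ending) =>
    let starting := if core_idx = core_id ∧ starting < 0 then stage_idx else starting
    let ending := if core_idx ≠ core_id ∧ starting ≥ 0 ∧ ending < 0 then stage_idx - 1 else ending
    pvALoop core_id rest (stage_idx + 1) (starting, ending)

def get_active_core_range (ind : List Int) (core_id : Int) (num_stages : Int) : Int × Int :=
  let st := pvALoop core_id ind 0 (-1, -1)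
  let starting := if st.1 = -1 then num_stages - 1 else st.1
  let ending := if st.2 = -1 then num_stages - 1 else st.2
  (starting, ending)

-- ===== PORT B =====
-- B's break-loop over ind[starting:] (the drop) with counter i starting at `starting`
-- and the default ending carried in; `i - 1` is returned at the first breaking element.
def pvBScan (core_id : Int) : List Int → Int → Int → Int
  | [], _, ending => ending
  | x :: xs, i, ending => if x ≠ core_id then i - 1 else pvBScan core_id xs (i + 1) ending

-- `core_id not in ind` + `ind.index(core_id)` ported together as a match on index?
-- (index? = none exactly when core_id ∉ ind); ind[starting:] with starting ≥ 0 is drop.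
def get_active_core_range_alt (ind : List Int) (core_id : Int) (num_stages : Int) : Int × Int :=
  match PySem.List.index? ind core_id with
  | none => (num_stages - 1, num_stages - 1)
  | some s => ((s : Int), pvBScan core_id (ind.drop s) (s : Int) (num_stages - 1))

-- ===== PRECONDITION & SPEC =====
def Spec_get_active_core_range (ind : List Int) (core_id : Int) (num_stages : Int) (out : Int × Int) : Prop := out = get_active_core_range_alt ind core_id num_stages
instance (ind : List Int) (core_id : Int) (num_stages : Int) (out : Int × Int) : Decidable (Spec_get_active_core_range ind core_id num_stages out) := by unfold Spec_get_active_core_range; infer_instance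

-- ===== CLAIM (what is proved, stated in full; the proofs are below) =====
def Claim_equal_get_active_core_range : Prop := ∀ (ind : List Int) (core_id : Int) (num_stages : Int), Dom_get_active_core_range ind core_id num_stages → Spec_get_active_core_range ind core_id num_stages (get_active_core_range ind core_id num_stages)

-- ===== LEMMAS AND PROOFS =====

-- A's loop never changes state while core_id is absent and starting is still -1.
theorem pvALoop_not_mem (core_id : Int) (xs : List Int) (i : Int)
    (h : core_id ∉ xs) : pvALoop core_id xs i (-1, -1) = (-1, -1) := by
  induction xs generalizing i with
  | nil => rfl
  | cons x rest ih =>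
    simp only [List.mem_cons, not_or] at h
    simp only [pvALoop]
    rw [if_neg (fun hc => h.1 hc.1.symm), if_neg (fun hc => absurd hc.2.1 (by omega))]
    exact ih _ h.2

-- Once both starting and ending are nonnegative, A's loop is constant.
theorem pvALoop_done (core_id : Int) (xs : List Int) (i s e : Int)
    (hs : 0 ≤ s) (he : 0 ≤ e) : pvALoop core_id xs i (s, e) = (s, e) := by
  induction xs generalizing i with
  | nil => rfl
  | cons x rest ih =>
    simp only [pvALoop]
    rw [if_neg (fun hc => absurd hc.2 (by omega)), if_neg (fun hc => absurd hc.2.2 (by omega))]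
    exact ih _

-- After the start is found (s ≥ 0) and while ending is -1, A's loop at counter i ≥ 1
-- computes exactly pvBScan with default -1.
theorem pvALoop_scan (core_id : Int) (xs : List Int) (i s : Int)
    (hs : 0 ≤ s) (hi : 1 ≤ i) :
    pvALoop core_id xs i (s, -1) = (s, pvBScan core_id xs i (-1)) := by
  induction xs generalizing i with
  | nil => rfl
  | cons x rest ih =>
    simp only [pvALoop, pvBScan]
    by_cases hx : x = core_id
    · rw [if_neg (fun hc => absurd hc.2 (by omega)), if_neg (fun hc => hc.1 hx),
        if_neg (fun hn => hn hx), ih _ (by omega)]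
    · rw [if_neg (fun hc => hx hc.1), if_pos ⟨hx, by omega, by omega⟩,
        if_pos hx, pvALoop_done _ _ _ _ _ hs (by omega)]

-- pvBScan with default -1 versus default d: equal unless it runs to the end.
theorem pvBScan_default (core_id : Int) (xs : List Int) (i d : Int) (hi : 1 ≤ i) :
    pvBScan core_id xs i d =
      (if pvBScan core_id xs i (-1) = -1 then d else pvBScan core_id xs i (-1)) := by
  induction xs generalizing i with
  | nil => simp [pvBScan]
  | cons x rest ih =>
    simp only [pvBScan]
    by_cases hx : x = core_id
    · have hn : ¬ (x ≠ core_id) := fun hn => hn hx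
      simp only [if_neg hn]
      exact ih _ (by omega)
    · have hp : x ≠ core_id := hx
      simp only [if_pos hp]
      rw [if_neg (by omega)]

-- The key decomposition: from ind = pre ++ core_id :: suf with core_id ∉ pre.
theorem pvALoop_split (core_id : Int) (pre suf : List Int) (i : Int)
    (hi : 0 ≤ i) (hpre : core_id ∉ pre) :
    pvALoop core_id (pre ++ core_id :: suf) i (-1, -1)
      = (i + pre.length, pvBScan core_id suf (i + pre.length + 1) (-1)) := by
  induction pre generalizing i with
  | nil =>
    simp only [List.nil_append, pvALoop, List.length_nil]
    norm_num
    rw [pvALoop_scan _ _ _ _ hi (by omega)]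
  | cons p rest ih =>
    simp only [List.mem_cons, not_or] at hpre
    simp only [List.cons_append, pvALoop]
    rw [if_neg (fun hc => hpre.1 hc.1.symm), if_neg (fun hc => absurd hc.2.1 (by omega)),
      ih _ (by omega) hpre.2]
    simp only [List.length_cons, Prod.mk.injEq]
    refine ⟨by push_cast; ring, ?_⟩
    congr 1
    push_cast; ring

-- ===== VERDICT (by name: the statement is the Claim_ definition above) =====
theorem get_active_core_range_spec : Claim_equal_get_active_core_range := by
  intro ind core_id num_stages _
  unfold Spec_get_active_core_range get_active_core_range get_active_core_range_alt
  cases hidx : PySem.List.index? ind core_id with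
  | none =>
    have hnm : core_id ∉ ind := (PySem.List.index?_eq_none_iff ind core_id).mp hidx
    simp [pvALoop_not_mem _ _ _ hnm]
  | some s =>
    obtain ⟨pre, suf, hdecomp, hlen, hpre⟩ :=
      (PySem.List.index?_eq_some_iff ind core_id s).mp hidx
    subst hdecomp
    subst hlen
    have hdrop : (pre ++ core_id :: suf).drop pre.length = core_id :: suf := by simp
    have hA := pvALoop_split core_id pre suf 0 (by omega) hpre
    simp only [zero_add] at hA
    simp only [hA, hdrop]
    have hb : pvBScan core_id (core_id :: suf) (pre.length : Int) (num_stages - 1)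
        = pvBScan core_id suf ((pre.length : Int) + 1) (num_stages - 1) := by
      simp [pvBScan]
    rw [hb, pvBScan_default core_id suf ((pre.length : Int) + 1) (num_stages - 1) (by omega)]
    simp only [Prod.mk.injEq]
    simp
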